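-- pv_equiv track=rewrite | github.com/Netflix/vmaf | python/src/vmaf/tools/misc.py | dedup_value_in_dict
-- ===== SOURCE A (Python) =====
-- def dedup_value_in_dict(d):
--     """
--     >>> dedup_value_in_dict({'a': 1, 'b': 1, 'c': 2}) == {'a': 1, 'c': 2}
--     True
--     """
--     reversed_d = dict()
--     keys = sorted(d.keys())
--     for key in keys:
--         value = d[key]
--         if value not in reversed_d:
--             reversed_d[value] = key
--     d_ = dict()
--     for value, key in reversed_d.items():
--         d_[key] = value
--     return d_
-- ===== SOURCE B (Python) =====
-- def dedup_value_in_dict(d):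
--     # aggregate: smallest key per value, one pass in insertion order
--     min_key = {}
--     for key, value in d.items():
--         if value not in min_key:
--             min_key[value] = key
--         elif key < min_key[value]:
--             min_key[value] = key
--     # emit pairs ordered by their (distinct) minimal keys
--     result = {}
--     for value, key in sorted(min_key.items(), key=lambda q: q[1]):
--         result[key] = value
--     return result
-- ===== Notes on version B (the rewrite author's own statement) =====
-- stated objective: alternative
-- what changed: A sorts all keys and dedups values in one pass over the sorted keys; B makes one unsorted pass maintaining a min-key-per-value table and then sorts only the distinct (value, min key) pairs by key.
import Mathlib
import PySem

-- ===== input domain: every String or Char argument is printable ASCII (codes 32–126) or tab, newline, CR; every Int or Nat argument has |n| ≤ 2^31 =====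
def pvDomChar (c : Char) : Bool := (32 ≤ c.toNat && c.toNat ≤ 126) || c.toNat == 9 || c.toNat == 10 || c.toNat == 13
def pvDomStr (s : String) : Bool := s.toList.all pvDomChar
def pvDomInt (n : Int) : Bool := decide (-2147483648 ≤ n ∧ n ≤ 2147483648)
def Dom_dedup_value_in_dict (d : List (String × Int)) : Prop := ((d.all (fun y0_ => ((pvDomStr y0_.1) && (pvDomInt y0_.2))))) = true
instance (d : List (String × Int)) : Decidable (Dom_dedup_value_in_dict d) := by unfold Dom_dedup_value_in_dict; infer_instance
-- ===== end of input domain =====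

-- B replaces A's sort-all-keys-then-dedup pass by a one-pass min-key-per-value table
-- followed by a sort of only the distinct (value, min key) pairs: an alternative decomposition.


-- ===== PORT A =====
-- A's first loop body: value = d[key]; if value not in reversed_d: reversed_d[value] = key
def pvAstep (dd : PySem.Dict String Int) (r : PySem.Dict Int String) (key : String) : PySem.Dict Int String :=
  let value := dd.getD key 0
  if r.contains value then r else r.insert value key

def dedup_value_in_dict (d : List (String × Int)) : List (String × Int) :=
  let dd := PySem.Dict.ofList d
  let keys := PySem.List.sorted dd.keys (fun k => k) false
  let reversed_d := keys.foldl (pvAstep dd) PySem.Dict.empty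
  let d_ := reversed_d.items.foldl (fun acc p => acc.insert p.2 p.1) PySem.Dict.empty
  d_.items

-- ===== PORT B =====
-- B's first loop body: keep the smaller key per value
def pvBstep (m : PySem.Dict Int String) (p : String × Int) : PySem.Dict Int String :=
  match m.get? p.2 with
  | none => m.insert p.2 p.1
  | some k0 => if p.1 < k0 then m.insert p.2 p.1 else m

def dedup_value_in_dict_alt (d : List (String × Int)) : List (String × Int) :=
  let dd := PySem.Dict.ofList d
  let min_key := dd.items.foldl pvBstep PySem.Dict.empty
  let pairs := PySem.List.sorted min_key.items (fun q => q.2) false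
  let result := pairs.foldl (fun acc q => acc.insert q.2 q.1) PySem.Dict.empty
  result.items

-- ===== PRECONDITION & SPEC =====
def Spec_dedup_value_in_dict (d : List (String × Int)) (out : List (String × Int)) : Prop := out = dedup_value_in_dict_alt d
instance (d : List (String × Int)) (out : List (String × Int)) : Decidable (Spec_dedup_value_in_dict d out) := by unfold Spec_dedup_value_in_dict; infer_instance

-- ===== CLAIM (what is proved, stated in full; the proofs are below) =====
def Claim_equal_dedup_value_in_dict : Prop := ∀ (d : List (String × Int)), Dom_dedup_value_in_dict d → Spec_dedup_value_in_dict d (dedup_value_in_dict d)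

-- ===== LEMMAS AND PROOFS =====

-- first key in ks whose value (under f) is v — what A's first loop records
def pvFirst? (f : String → Int) (v : Int) : List String → Option String
  | [] => none
  | k :: ks => if f k = v then some k else pvFirst? f v ks

-- minimal first component among pairs of L with second component v — what B's first loop records
def pvMinkey? (v : Int) : List (String × Int) → Option String
  | [] => none
  | p :: L => if p.2 = v then
      match pvMinkey? v L with
      | none => some p.1
      | some k => some (min p.1 k)
    else pvMinkey? v L

def pvOptMin : Option String → Option String → Option String
  | none, b => b
  | some a, none => some a
  | some a, some b => some (min a b)

theorem pvAstep_eq (dd : PySem.Dict String Int) (r : PySem.Dict Int String) (k : String) :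
    pvAstep dd r k = if r.contains (dd.getD k 0) then r else r.insert (dd.getD k 0) k := rfl

theorem pvMinkey?_cons (v : Int) (p : String × Int) (L : List (String × Int)) :
    pvMinkey? v (p :: L) = if p.2 = v then
      (match pvMinkey? v L with
       | none => some p.1
       | some k => some (min p.1 k))
    else pvMinkey? v L := rfl

-- A's first loop: lookup = accumulator entry first, else first occurrence in the remaining keys
theorem foldA_get? (dd : PySem.Dict String Int) (ks : List String)
    (r : PySem.Dict Int String) (v : Int) :
    ((ks.foldl (pvAstep dd) r).get? v) = (r.get? v).or (pvFirst? (fun k => dd.getD k 0) v ks) := by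
  induction ks generalizing r with
  | nil => simp [pvFirst?]
  | cons k ks ih =>
    simp only [List.foldl_cons, ih, pvFirst?, pvAstep]
    by_cases hc : r.contains (dd.getD k 0)
    · simp only [hc, if_true]
      by_cases hv : dd.getD k 0 = v
      · have : (r.get? v).isSome := by
          rw [← PySem.Dict.contains_eq_isSome_get?, ← hv]; exact hc
        obtain ⟨a, ha⟩ := Option.isSome_iff_exists.mp this
        simp [ha, hv]
      · simp [hv]
    · simp only [Bool.not_eq_true] at hc
      simp only [hc, Bool.false_eq_true, if_false]
      have hr : r.get? (dd.getD k 0) = none :=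
        (PySem.Dict.get?_eq_none_iff_contains r _).mpr (by simpa using hc)
      by_cases hv : dd.getD k 0 = v
      · rw [PySem.Dict.get?_insert]
        simp [hv, hv ▸ hr]
      · rw [PySem.Dict.get?_insert]
        rw [if_neg (fun h : v = dd.getD k 0 => hv h.symm)]
        simp [hv]

-- B's first loop: lookup = min of accumulator entry and minimal key in the rest
theorem foldB_get? (L : List (String × Int)) (m : PySem.Dict Int String) (v : Int) :
    ((L.foldl pvBstep m).get? v) = pvOptMin (m.get? v) (pvMinkey? v L) := by
  induction L generalizing m with
  | nil => cases h : m.get? v <;> simp [pvMinkey?, pvOptMin, h]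
  | cons p L ih =>
    rw [List.foldl_cons, ih, pvMinkey?_cons]
    cases hm : m.get? p.2 with
    | none =>
      have hstep : pvBstep m p = m.insert p.2 p.1 := by simp [pvBstep, hm]
      rw [hstep, PySem.Dict.get?_insert]
      by_cases hv : p.2 = v
      · subst hv
        rw [if_pos rfl, if_pos rfl, hm]
        cases hL : pvMinkey? p.2 L <;> rfl
      · rw [if_neg (fun h : v = p.2 => hv h.symm), if_neg hv]
    | some k0 =>
      by_cases hlt : p.1 < k0
      · have hstep : pvBstep m p = m.insert p.2 p.1 := by simp [pvBstep, hm, hlt]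
        rw [hstep, PySem.Dict.get?_insert]
        by_cases hv : p.2 = v
        · subst hv
          rw [if_pos rfl, if_pos rfl, hm]
          cases hL : pvMinkey? p.2 L with
          | none =>
            show some p.1 = some (min k0 p.1)
            rw [min_eq_right (le_of_lt hlt)]
          | some k =>
            show some (min p.1 k) = some (min k0 (min p.1 k))
            rw [← min_assoc, min_eq_right (le_of_lt hlt)]
        · rw [if_neg (fun h : v = p.2 => hv h.symm), if_neg hv]
      · have hstep : pvBstep m p = m := by simp [pvBstep, hm, hlt]
        rw [hstep]
        by_cases hv : p.2 = v
        · subst hv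
          rw [if_pos rfl, hm]
          cases hL : pvMinkey? p.2 L with
          | none =>
            show some k0 = some (min k0 p.1)
            rw [min_eq_left (not_lt.mp hlt)]
          | some k =>
            show some (min k0 k) = some (min k0 (min p.1 k))
            rw [← min_assoc, min_eq_left (not_lt.mp hlt)]
        · rw [if_neg hv]

theorem foldA_nodup (dd : PySem.Dict String Int) (ks : List String)
    (r : PySem.Dict Int String) (h : r.keys.Nodup) :
    (ks.foldl (pvAstep dd) r).keys.Nodup := by
  induction ks generalizing r with
  | nil => simpa using h
  | cons k ks ih =>
    rw [List.foldl_cons]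
    apply ih
    rw [pvAstep_eq]
    split
    · exact h
    · exact PySem.Dict.nodup_keys_insert _ _ _ h

theorem foldB_nodup (L : List (String × Int)) (m : PySem.Dict Int String) (h : m.keys.Nodup) :
    (L.foldl pvBstep m).keys.Nodup := by
  induction L generalizing m with
  | nil => simpa using h
  | cons p L ih =>
    rw [List.foldl_cons]
    apply ih
    cases hm : m.get? p.2 with
    | none =>
      have hstep : pvBstep m p = m.insert p.2 p.1 := by simp [pvBstep, hm]
      rw [hstep]; exact PySem.Dict.nodup_keys_insert _ _ _ h
    | some k0 =>
      by_cases hlt : p.1 < k0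
      · have hstep : pvBstep m p = m.insert p.2 p.1 := by simp [pvBstep, hm, hlt]
        rw [hstep]; exact PySem.Dict.nodup_keys_insert _ _ _ h
      · have hstep : pvBstep m p = m := by simp [pvBstep, hm, hlt]
        rw [hstep]; exact h

-- A's first loop over strictly increasing keys yields items strictly increasing in the stored key
theorem foldA_pairwise (dd : PySem.Dict String Int) (ks : List String)
    (r : PySem.Dict Int String) (hks : ks.Pairwise (· < ·))
    (hr : r.items.Pairwise (fun a b => a.2 < b.2))
    (hlt : ∀ p ∈ r.items, ∀ k ∈ ks, p.2 < k) :
    (ks.foldl (pvAstep dd) r).items.Pairwise (fun a b => a.2 < b.2) := by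
  induction ks generalizing r with
  | nil => simpa using hr
  | cons k ks ih =>
    rw [List.foldl_cons]
    rw [List.pairwise_cons] at hks
    apply ih _ hks.2
    · rw [pvAstep_eq]
      split
      · exact hr
      · rename_i hc
        rw [PySem.Dict.items_insert_of_not_contains _ _ (by simpa using hc)]
        rw [List.pairwise_append]
        refine ⟨hr, by simp, ?_⟩
        intro a ha b hb
        simp only [List.mem_singleton] at hb
        subst hb
        exact hlt a ha k (by simp)
    · intro p hp k' hk'
      rw [pvAstep_eq] at hp
      split at hp
      · exact hlt p hp k' (by simp [hk'])
      · rename_i hc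
        rw [PySem.Dict.items_insert_of_not_contains _ _ (by simpa using hc)] at hp
        rcases List.mem_append.mp hp with h1 | h2
        · exact hlt p h1 k' (by simp [hk'])
        · simp only [List.mem_singleton] at h2
          subst h2
          exact hks.1 k' hk'

theorem pvFirst?_isSome (f : String → Int) (v : Int) (ks : List String) :
    (pvFirst? f v ks).isSome = true ↔ v ∈ ks.map f := by
  induction ks with
  | nil => simp [pvFirst?]
  | cons k ks ih =>
    unfold pvFirst?
    by_cases h : f k = v
    · simp [h]
    · simp only [if_neg h, ih, List.map_cons, List.mem_cons]
      constructor
      · exact fun hh => Or.inr hh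
      · rintro (hh | hh)
        · exact absurd hh.symm h
        · exact hh

theorem pvMinkey?_isSome (v : Int) (L : List (String × Int)) :
    (pvMinkey? v L).isSome = true ↔ v ∈ L.map (·.2) := by
  induction L with
  | nil => simp [pvMinkey?]
  | cons p L ih =>
    unfold pvMinkey?
    by_cases h : p.2 = v
    · simp only [if_pos h, List.map_cons, List.mem_cons]
      cases hL : pvMinkey? v L <;> simp [h]
    · simp only [if_neg h, ih, List.map_cons, List.mem_cons]
      constructor
      · exact fun hh => Or.inr hh
      · rintro (hh | hh)
        · exact absurd hh.symm h
        · exact hh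

theorem pvFirst?_min (f : String → Int) (v : Int) (ks : List String) (k : String)
    (hks : ks.Pairwise (· < ·)) (h : pvFirst? f v ks = some k) :
    (k ∈ ks ∧ f k = v) ∧ ∀ k' ∈ ks, f k' = v → k ≤ k' := by
  induction ks with
  | nil => simp [pvFirst?] at h
  | cons a ks ih =>
    rw [List.pairwise_cons] at hks
    unfold pvFirst? at h
    by_cases ha : f a = v
    · rw [if_pos ha] at h
      cases h
      refine ⟨⟨by simp, ha⟩, ?_⟩
      intro k' hk' _
      rcases List.mem_cons.mp hk' with h1 | h2
      · exact le_of_eq h1.symm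
      · exact le_of_lt (hks.1 k' h2)
    · rw [if_neg ha] at h
      obtain ⟨⟨hmem, hfv⟩, hle⟩ := ih hks.2 h
      refine ⟨⟨List.mem_cons_of_mem _ hmem, hfv⟩, ?_⟩
      intro k' hk' hfk'
      rcases List.mem_cons.mp hk' with h1 | h2
      · exact absurd (h1 ▸ hfk') ha
      · exact hle k' h2 hfk'

theorem pvMinkey?_min (v : Int) (L : List (String × Int)) (k : String)
    (h : pvMinkey? v L = some k) :
    ((k, v) ∈ L) ∧ ∀ p ∈ L, p.2 = v → k ≤ p.1 := by
  induction L generalizing k with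
  | nil => simp [pvMinkey?] at h
  | cons p L ih =>
    unfold pvMinkey? at h
    by_cases hv : p.2 = v
    · rw [if_pos hv] at h
      cases hL : pvMinkey? v L with
      | none =>
        rw [hL] at h
        cases h
        refine ⟨by rw [← hv]; exact List.mem_cons_self, ?_⟩
        · intro q hq hqv
          rcases List.mem_cons.mp hq with h1 | h2
          · exact le_of_eq (congrArg Prod.fst h1).symm
          · exfalso
            have hs : (pvMinkey? v L).isSome = true :=
              (pvMinkey?_isSome v L).mpr (List.mem_map.mpr ⟨q, h2, hqv⟩)
            rw [hL] at hs
            simp at hs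
      | some k1 =>
        rw [hL] at h
        cases h
        obtain ⟨hmem, hle⟩ := ih k1 hL
        constructor
        · rcases min_cases p.1 k1 with ⟨he, _⟩ | ⟨he, _⟩ <;> rw [he]
          · rw [← hv]; exact List.mem_cons_self
          · exact List.mem_cons_of_mem _ hmem
        · intro q hq hqv
          rcases List.mem_cons.mp hq with h1 | h2
          · rw [h1]
            exact min_le_left _ _
          · exact le_trans (min_le_right _ _) (hle q h2 hqv)
    · rw [if_neg hv] at h
      obtain ⟨hmem, hle⟩ := ih k h
      refine ⟨List.mem_cons_of_mem _ hmem, ?_⟩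
      intro q hq hqv
      rcases List.mem_cons.mp hq with h1 | h2
      · exact absurd (h1 ▸ hqv) hv
      · exact hle q h2 hqv

theorem dedup_value_in_dict_eq_alt (d : List (String × Int)) :
    dedup_value_in_dict d = dedup_value_in_dict_alt d := by
  set dd := PySem.Dict.ofList d with hdd
  have hnd : dd.keys.Nodup := PySem.Dict.nodup_keys_ofList d
  set ks := PySem.List.sorted dd.keys (fun k => k) false with hks
  have hksperm : ks.Perm dd.keys := PySem.List.sorted_perm _ _ _
  have hksnd : ks.Nodup := hksperm.nodup_iff.mpr hnd
  have hkslt : ks.Pairwise (· < ·) := by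
    have h1 : ks.Pairwise (· ≤ ·) := by
      simpa using PySem.List.sorted_pairwise dd.keys (fun k => k)
    exact (h1.and hksnd).imp (fun h => lt_of_le_of_ne h.1 h.2)
  set RA := ks.foldl (pvAstep dd) PySem.Dict.empty with hRA
  set RB := dd.items.foldl pvBstep PySem.Dict.empty with hRB
  have getA : ∀ v, RA.get? v = pvFirst? (fun k => dd.getD k 0) v ks := by
    intro v
    rw [hRA, foldA_get?, PySem.Dict.get?_empty]
    rfl
  have getB : ∀ v, RB.get? v = pvMinkey? v dd.items := by
    intro v
    rw [hRB, foldB_get?, PySem.Dict.get?_empty]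
    rfl
  have hitems : dd.items = dd.keys.map (fun k => (k, dd.getD k 0)) :=
    PySem.Dict.items_eq_map_keys dd hnd 0
  have corr : ∀ (k : String) (v : Int), (k, v) ∈ dd.items ↔ (k ∈ ks ∧ dd.getD k 0 = v) := by
    intro k v
    rw [hitems, List.mem_map]
    constructor
    · rintro ⟨k', hk', he⟩
      obtain ⟨h1, h2⟩ := Prod.mk.injEq .. ▸ he
      subst h1
      exact ⟨(PySem.List.mem_sorted _ _ _ _).mpr hk', h2⟩
    · rintro ⟨hk, hv⟩
      exact ⟨k, (PySem.List.mem_sorted _ _ _ _).mp hk, by rw [hv]⟩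
  have get_same : ∀ v, RA.get? v = RB.get? v := by
    intro v
    rw [getA, getB]
    have hmem : v ∈ ks.map (fun k => dd.getD k 0) ↔ v ∈ dd.items.map (·.2) := by
      simp only [List.mem_map]
      constructor
      · rintro ⟨k, hk, hv⟩
        exact ⟨(k, v), (corr k v).mpr ⟨hk, hv⟩, rfl⟩
      · rintro ⟨p, hp, hv⟩
        obtain ⟨hk, hgd⟩ := (corr p.1 p.2).mp (by simpa using hp)
        exact ⟨p.1, hk, by rw [hgd, hv]⟩
    cases hA : pvFirst? (fun k => dd.getD k 0) v ks with
    | none =>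
      cases hB : pvMinkey? v dd.items with
      | none => rfl
      | some k =>
        exfalso
        have h2 := (pvMinkey?_isSome v dd.items).mp (by simp [hB])
        have h3 := (pvFirst?_isSome (fun k => dd.getD k 0) v ks).mpr (hmem.mpr h2)
        simp [hA] at h3
    | some k1 =>
      cases hB : pvMinkey? v dd.items with
      | none =>
        exfalso
        have h2 := (pvFirst?_isSome (fun k => dd.getD k 0) v ks).mp (by simp [hA])
        have h3 := (pvMinkey?_isSome v dd.items).mpr (hmem.mp h2)
        simp [hB] at h3
      | some k2 =>
        obtain ⟨⟨hk1mem, hk1v⟩, hk1min⟩ := pvFirst?_min _ _ _ _ hkslt hA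
        obtain ⟨hk2mem, hk2min⟩ := pvMinkey?_min _ _ _ hB
        have h12 : k1 ≤ k2 := by
          obtain ⟨hk2ks, hk2v⟩ := (corr k2 v).mp hk2mem
          exact hk1min k2 hk2ks hk2v
        have h21 : k2 ≤ k1 := hk2min (k1, v) ((corr k1 v).mpr ⟨hk1mem, hk1v⟩) rfl
        rw [le_antisymm h12 h21]
  have hRAnd : RA.keys.Nodup := foldA_nodup dd ks _ (by simp)
  have hRBnd : RB.keys.Nodup := foldB_nodup dd.items _ (by simp)
  have keys_mem : ∀ v, v ∈ RB.keys ↔ v ∈ RA.keys := by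
    intro v
    rw [← Decidable.not_iff_not]
    rw [← PySem.Dict.get?_eq_none_iff_not_mem_keys, ← PySem.Dict.get?_eq_none_iff_not_mem_keys]
    rw [get_same v]
  have keysPerm : RB.keys.Perm RA.keys := (List.perm_ext_iff_of_nodup hRBnd hRAnd).mpr keys_mem
  have hfun : (fun v => (v, RB.getD v "")) = (fun v => (v, RA.getD v "")) := by
    funext v
    rw [PySem.Dict.getD_eq_get?_getD, PySem.Dict.getD_eq_get?_getD, get_same v]
  have perm : RB.items.Perm RA.items := by
    rw [PySem.Dict.items_eq_map_keys RA hRAnd "", PySem.Dict.items_eq_map_keys RB hRBnd "", hfun]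
    exact keysPerm.map _
  have hempty : (PySem.Dict.empty : PySem.Dict Int String).items = [] := rfl
  have pairA : RA.items.Pairwise (fun a b => a.2 < b.2) :=
    foldA_pairwise dd ks _ hkslt (by rw [hempty]; exact List.Pairwise.nil)
      (by rw [hempty]; intro p hp; simp at hp)
  have hsorted : PySem.List.sorted RB.items (fun q => q.2) false = RA.items :=
    PySem.List.sorted_eq_of_perm_of_pairwise_lt _ _ _ perm.symm pairA
  have hA : dedup_value_in_dict d = (RA.items.foldl (fun acc p => acc.insert p.2 p.1) PySem.Dict.empty).items := rfl
  have hB : dedup_value_in_dict_alt d = ((PySem.List.sorted RB.items (fun q => q.2) false).foldl (fun acc q => acc.insert q.2 q.1) PySem.Dict.empty).items := rfl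
  rw [hA, hB, hsorted]

-- ===== VERDICT (by name: the statement is the Claim_ definition above) =====
theorem dedup_value_in_dict_spec : Claim_equal_dedup_value_in_dict := by
  intro d _
  unfold Spec_dedup_value_in_dict
  exact dedup_value_in_dict_eq_alt d
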